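-- pv_equiv track=rewrite | github.com/pwschaedler/advent-of-code-2022 | src/day1.py | find_most_calories
-- ===== SOURCE A (Python) =====
-- from typing import Iterable
--
-- def find_most_calories(input_lines: Iterable[str]) -> int:
--     """
--     Find the elf carrying the most calories and return the total calories
--     they have.
--     """
--     max_calories = -1
--     current = 0
--     for line in input_lines:
--         line = line.strip()
--         if line == '':
--             max_calories = max(max_calories, current)
--             current = 0
--         else:
--             current += int(line)
--     max_calories = max(max_calories, current)  # Last chunk
--     return max_calories
-- ===== SOURCE B (Python) =====
-- def find_most_calories(input_lines):
--     """
--     Find the elf carrying the most calories and return the total calories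
--     they have.
--
--     Recursive decomposition: sums(lines) returns the list of group sums
--     (blank stripped lines separate groups); answer is max([-1] + sums).
--     """
--     def sums(lines):
--         if not lines:
--             return [0]
--         rest = sums(lines[1:])
--         head = lines[0].strip()
--         if head == '':
--             return [0] + rest
--         return [rest[0] + int(head)] + rest[1:]
--     return max([-1] + sums(list(input_lines)))
-- ===== Notes on version B (the rewrite author's own statement) =====
-- stated objective: alternative
-- what changed: B replaces A's single iterative pass with running (max, sum) state by a structural recursion that builds the list of per-group sums from the tail, then reduces with max([-1] + sums).
import Mathlib
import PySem

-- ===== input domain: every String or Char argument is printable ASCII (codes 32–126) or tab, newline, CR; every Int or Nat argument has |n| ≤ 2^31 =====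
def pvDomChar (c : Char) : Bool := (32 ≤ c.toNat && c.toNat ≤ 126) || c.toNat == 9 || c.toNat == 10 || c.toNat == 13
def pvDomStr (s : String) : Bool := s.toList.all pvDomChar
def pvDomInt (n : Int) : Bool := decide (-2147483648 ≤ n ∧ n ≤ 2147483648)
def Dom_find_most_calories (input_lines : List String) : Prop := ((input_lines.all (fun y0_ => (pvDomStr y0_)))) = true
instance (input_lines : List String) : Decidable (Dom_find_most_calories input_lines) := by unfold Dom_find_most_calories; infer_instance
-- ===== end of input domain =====

-- B computes the list of per-group sums by structural recursion on the lines, then reduces with max([-1] + sums); A interleaves a running sum and running max in one fold. Same O(n) cost.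


-- ===== PORT A =====
-- A's loop: state (max_calories, current), line-by-line as in the Python.
def find_most_calories (input_lines : List String) : Int :=
  let st := input_lines.foldl
    (fun (st : Int × Int) line =>
      let line := PySem.Str.strip line
      if line = "" then (max st.1 st.2, 0)
      else (st.1, st.2 + (PySem.Int.ofStr? line).getD 0))  -- int(line); none (ValueError) excluded by Pre_
    (-1, 0)
  max st.1 st.2

-- ===== PORT B =====
-- B's recursion 'sums': list of group sums, built from the tail's result; always nonempty.
def pvSums : List String → List Int
  | [] => [0]
  | l :: ls =>
    let rest := pvSums ls
    let head := PySem.Str.strip l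
    if head = "" then 0 :: rest
    else (rest.headI + (PySem.Int.ofStr? head).getD 0) :: rest.tail  -- int(head); none (ValueError) excluded by Pre_

def find_most_calories_alt (input_lines : List String) : Int :=
  ((-1 : Int) :: pvSums input_lines).foldl max (-1)  -- max([-1] + sums)

-- ===== PRECONDITION & SPEC =====
-- Pre_ excludes exactly the inputs where some non-blank stripped line is not a valid int literal: there int(line) raises ValueError in both A and B.
def Pre_find_most_calories (input_lines : List String) : Prop :=
  ∀ line ∈ input_lines,
    PySem.Str.strip line = "" ∨ (PySem.Int.ofStr? (PySem.Str.strip line)).isSome = true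
instance (input_lines : List String) : Decidable (Pre_find_most_calories input_lines) := by unfold Pre_find_most_calories; infer_instance
def pvWitness_find_most_calories : List String := ["100", " 200 ", "", "+300"]
def Spec_find_most_calories (input_lines : List String) (out : Int) : Prop := out = find_most_calories_alt input_lines
instance (input_lines : List String) (out : Int) : Decidable (Spec_find_most_calories input_lines out) := by unfold Spec_find_most_calories; infer_instance

-- ===== CLAIM (what is proved, stated in full; the proofs are below) =====
def Claim_equal_find_most_calories : Prop := ∀ (input_lines : List String), Dom_find_most_calories input_lines → Pre_find_most_calories input_lines → Spec_find_most_calories input_lines (find_most_calories input_lines)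

-- ===== LEMMAS AND PROOFS =====

theorem pvSums_ne_nil (ls : List String) : pvSums ls ≠ [] := by
  cases ls with
  | nil => simp [pvSums]
  | cons l ls => unfold pvSums; dsimp only; split <;> simp

-- Loop correspondence: running A's fold from (m, c) and taking max of the pair
-- equals folding max over m, c added into the first group sum of the remainder.
theorem pv_loop_corr (lines : List String) (m c : Int) :
    (let st := lines.foldl
      (fun (st : Int × Int) line =>
        let line := PySem.Str.strip line
        if line = "" then (max st.1 st.2, 0)
        else (st.1, st.2 + (PySem.Int.ofStr? line).getD 0))
      (m, c);
     max st.1 st.2)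
    = ((c + (pvSums lines).headI) :: (pvSums lines).tail).foldl max m := by
  induction lines generalizing m c with
  | nil => simp [pvSums]
  | cons l ls ih =>
    by_cases h : PySem.Str.strip l = ""
    · obtain ⟨s, t, hst⟩ := List.exists_cons_of_ne_nil (pvSums_ne_nil ls)
      simpa [pvSums, h, hst] using ih (max m c) 0
    · obtain ⟨s, t, hst⟩ := List.exists_cons_of_ne_nil (pvSums_ne_nil ls)
      have := ih m (c + (PySem.Int.ofStr? (PySem.Str.strip l)).getD 0)
      simp [pvSums, h, hst] at this ⊢
      rw [this]; ring_nf

-- ===== VERDICT (by name: the statement is the Claim_ definition above) =====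
theorem find_most_calories_spec : Claim_equal_find_most_calories := by
  intro input_lines _ _
  unfold Spec_find_most_calories find_most_calories find_most_calories_alt
  obtain ⟨s, t, hst⟩ := List.exists_cons_of_ne_nil (pvSums_ne_nil input_lines)
  have h := pv_loop_corr input_lines (-1) 0
  simp only [hst, List.headI, List.tail] at h ⊢
  simpa using h
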